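-- pv_equiv track=rewrite | github.com/xxxxuchen/COMP204_Diagnostic | diagnosticA6.py | similarity_to_patients
-- ===== SOURCE A (Python) =====
-- from typing import Tuple, Set, Dict
--
-- def symptom_similarity(symptoms_A: Tuple[Set], symptoms_B: Tuple[Set]) -> int:
--     """
--     Returns the similarity between symptoms_A and symptoms_B. symptoms_A and
--     symptoms_B are tuples of a set of symptoms present and a set of symptoms absent.
--     The similarity measure is computed by the following equations:
--     present_present + absent_absent - present_absent - absent_present
--     where:
--     present_present is the number of symptoms present in both patients
--     absent_absent is the number of symptoms absent in both patients
--     present_absent is the number of symptoms present in patientA and absent in patientB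
--     absent_present is the number of symptoms absent in patientA and present
--     in patientB
--     >>>symptom_similarity(yang, maria)
--     1
--     """
--     present_present = len(symptoms_A[0].intersection(symptoms_B[0]))
--     absent_absent = len(symptoms_A[1].intersection(symptoms_B[1]))
--     present_absent = len(symptoms_A[0].intersection(symptoms_B[1]))
--     absent_present= len(symptoms_A[1].intersection(symptoms_B[0]))
--     return  present_present + absent_absent - present_absent - absent_present
--
-- def similarity_to_patients(my_symptoms: Tuple[Set], all_patients: Dict[str, Tuple[Set]]) -> Set[int]:
--     """
--     Returns a set of the patient IDs with the highest similarity between my_symptoms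
--     (which is a tuple of symptoms present and absent) and the symptoms of
--     all the patients stored in the dictionary all_patients.
--     >>>similarity_to_patients(yang, all_patients_symptoms)
--     {45437, 73454}
--      """
--     highest_sim = -1000000000
--     highest_pat = set()
--     for patient_id, symptoms in all_patients.items():
--         sim = symptom_similarity(my_symptoms, symptoms)
--         if sim == highest_sim:
--             highest_pat.add(patient_id)
--         elif sim > highest_sim:
--             highest_pat.clear()
--             highest_sim = sim
--             highest_pat.add(patient_id)
--     return highest_pat
-- ===== SOURCE B (Python) =====
-- from typing import Tuple, Set, Dict
--
-- def symptom_similarity(symptoms_A, symptoms_B):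
--     present_present = len(symptoms_A[0].intersection(symptoms_B[0]))
--     absent_absent = len(symptoms_A[1].intersection(symptoms_B[1]))
--     present_absent = len(symptoms_A[0].intersection(symptoms_B[1]))
--     absent_present = len(symptoms_A[1].intersection(symptoms_B[0]))
--     return present_present + absent_absent - present_absent - absent_present
--
-- def similarity_to_patients(my_symptoms, all_patients):
--     # Build the score table once, then select every id achieving the best score.
--     # A never reports a similarity below its -1000000000 floor, so the floor is
--     # kept as the lower bound of the maximum (it also covers the empty dict).
--     scores = {pid: symptom_similarity(my_symptoms, s) for pid, s in all_patients.items()}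
--     best = max([-1000000000] + list(scores.values()))
--     return {pid for pid, sc in scores.items() if sc == best}
-- ===== Notes on version B (the rewrite author's own statement) =====
-- stated objective: simpler
-- what changed: A's single pass with a running maximum and clear-then-refill set bookkeeping is replaced by a two-phase decomposition: build the {pid: score} table once, take best = max of the scores floored at A's -1000000000 lower bound, and select every pid whose score equals best.
import Mathlib
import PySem

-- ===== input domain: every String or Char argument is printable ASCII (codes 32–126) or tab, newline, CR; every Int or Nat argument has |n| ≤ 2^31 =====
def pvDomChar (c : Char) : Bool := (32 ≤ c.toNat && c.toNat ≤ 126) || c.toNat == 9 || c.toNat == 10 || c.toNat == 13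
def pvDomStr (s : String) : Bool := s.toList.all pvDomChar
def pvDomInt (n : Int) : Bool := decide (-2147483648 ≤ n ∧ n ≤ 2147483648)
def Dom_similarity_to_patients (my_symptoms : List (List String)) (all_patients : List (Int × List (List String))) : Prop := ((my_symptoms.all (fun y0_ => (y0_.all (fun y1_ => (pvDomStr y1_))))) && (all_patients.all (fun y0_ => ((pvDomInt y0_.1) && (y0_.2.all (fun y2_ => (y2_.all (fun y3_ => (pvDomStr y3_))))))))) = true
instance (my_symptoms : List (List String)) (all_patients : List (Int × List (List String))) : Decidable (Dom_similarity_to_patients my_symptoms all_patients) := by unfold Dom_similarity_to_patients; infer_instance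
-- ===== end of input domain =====

-- B replaces A's single running-max pass (with its clear-the-set bookkeeping) by a two-phase
-- build-score-table / select-by-max decomposition, keeping A's -1000000000 similarity floor as the
-- lower bound of the maximum; objective: simpler. Equality is about the RETURN value.

-- ===== PORT A =====
-- symptom_similarity, textually identical in Source A and Source B, so shared by both ports.
-- The tuple indexings symptoms_A[0] … are ported with pyGetD (total form): Pre_ guarantees the
-- index is in range wherever the function is called, exactly where Python does not raise IndexError.
def pvSymSim (sa sb : List (List String)) : Int :=
  let pp := PySem.Set.len (PySem.Set.inter (PySem.Set.ofList (PySem.List.pyGetD sa 0 [])) (PySem.Set.ofList (PySem.List.pyGetD sb 0 [])))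
  let aa := PySem.Set.len (PySem.Set.inter (PySem.Set.ofList (PySem.List.pyGetD sa 1 [])) (PySem.Set.ofList (PySem.List.pyGetD sb 1 [])))
  let pa := PySem.Set.len (PySem.Set.inter (PySem.Set.ofList (PySem.List.pyGetD sa 0 [])) (PySem.Set.ofList (PySem.List.pyGetD sb 1 [])))
  let ap := PySem.Set.len (PySem.Set.inter (PySem.Set.ofList (PySem.List.pyGetD sa 1 [])) (PySem.Set.ofList (PySem.List.pyGetD sb 0 [])))
  pp + aa - pa - ap

-- A's for-loop over all_patients.items() with state (highest_sim, highest_pat)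
def pvLoopA (my : List (List String)) : List (Int × List (List String)) → Int × PySem.Set Int → Int × PySem.Set Int
  | [], st => st
  | p :: rest, st =>
    let sim := pvSymSim my p.2
    if sim = st.1 then pvLoopA my rest (st.1, PySem.Set.add st.2 p.1)
    else if st.1 < sim then pvLoopA my rest (sim, PySem.Set.add PySem.Set.empty p.1)
    else pvLoopA my rest st

def similarity_to_patients (my_symptoms : List (List String)) (all_patients : List (Int × List (List String))) : List Int :=
  (pvLoopA my_symptoms all_patients ((-1000000000 : Int), PySem.Set.empty)).2

-- ===== PORT B =====
def similarity_to_patients_alt (my_symptoms : List (List String)) (all_patients : List (Int × List (List String))) : List Int :=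
  -- the dict comprehension {pid: score} as an association list in insertion order; .values() = map Prod.snd
  let scores : List (Int × Int) := all_patients.map (fun p => (p.1, pvSymSim my_symptoms p.2))
  -- best = max([-1000000000] + list(scores.values())): the list is nonempty, so max? is always some
  match PySem.List.max? (((-1000000000 : Int)) :: scores.map Prod.snd) (fun v => v) with
  | none => (PySem.Set.empty : PySem.Set Int)
  | some best => PySem.Set.ofList ((scores.filter (fun q => q.2 == best)).map Prod.fst)

-- ===== PRECONDITION & SPEC =====
-- Pre_ excludes: (a) association lists with duplicate patient ids, which no Python dict argument can
-- represent (A's and B's values there are artefacts of the encoding); (b) inputs where BOTH Pythons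
-- raise IndexError, i.e. all_patients nonempty while my_symptoms or some patient's symptoms tuple
-- has fewer than 2 components.
def Pre_similarity_to_patients (my_symptoms : List (List String)) (all_patients : List (Int × List (List String))) : Prop :=
  (all_patients.map Prod.fst).Nodup ∧
  (all_patients = [] ∨
    (2 ≤ my_symptoms.length ∧ (∀ p ∈ all_patients, 2 ≤ p.2.length)))
instance (my_symptoms : List (List String)) (all_patients : List (Int × List (List String))) : Decidable (Pre_similarity_to_patients my_symptoms all_patients) := by unfold Pre_similarity_to_patients; infer_instance

def pvWitness_similarity_to_patients : List (List String) × (List (Int × List (List String))) :=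
  ([["a"], ["b"]], [((1 : Int), [["a"], ["c"]])])

def Spec_similarity_to_patients (my_symptoms : List (List String)) (all_patients : List (Int × List (List String))) (out : List Int) : Prop := out = similarity_to_patients_alt my_symptoms all_patients
instance (my_symptoms : List (List String)) (all_patients : List (Int × List (List String))) (out : List Int) : Decidable (Spec_similarity_to_patients my_symptoms all_patients out) := by unfold Spec_similarity_to_patients; infer_instance

-- ===== CLAIM (what is proved, stated in full; the proofs are below) =====
def Claim_equal_similarity_to_patients : Prop := ∀ (my_symptoms : List (List String)) (all_patients : List (Int × List (List String))), Dom_similarity_to_patients my_symptoms all_patients → Pre_similarity_to_patients my_symptoms all_patients → Spec_similarity_to_patients my_symptoms all_patients (similarity_to_patients my_symptoms all_patients)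

-- ===== LEMMAS AND PROOFS =====

-- a running max over elements all ≤ the accumulator stays put
theorem pv_foldl_max_stay {β : Type} (f : β → Int) : ∀ (l : List β) (a : Int), (∀ p ∈ l, f p ≤ a) →
    l.foldl (fun acc p => max acc (f p)) a = a := by
  intro l
  induction l with
  | nil => intro a _; rfl
  | cons q rest ih =>
    intro a h
    simp only [List.foldl_cons]
    rw [max_eq_left (h q (List.mem_cons_self))]
    exact ih a (fun p hp => h p (List.mem_cons_of_mem _ hp))

-- the guarded add-fold is the plain add-fold over the filtered ids
theorem pv_foldl_if_filter (my : List (List String)) (hsim : Int) :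
    ∀ (l : List (Int × List (List String))) (s : PySem.Set Int),
    l.foldl (fun s p => if pvSymSim my p.2 = hsim then PySem.Set.add s p.1 else s) s
      = List.foldl PySem.Set.add s ((l.filter (fun p => pvSymSim my p.2 == hsim)).map Prod.fst) := by
  intro l
  induction l with
  | nil => intro s; rfl
  | cons q rest ih =>
    intro s
    simp only [List.foldl_cons, List.filter_cons]
    by_cases hc : pvSymSim my q.2 = hsim
    · simp only [hc, if_pos, beq_self_eq_true, List.map_cons, List.foldl_cons]; exact ih _
    · have : (pvSymSim my q.2 == hsim) = false := by simp [hc]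
      simp only [hc, this, Bool.false_eq_true, if_false]; exact ih s

-- A's loop when no score ever exceeds the accumulator: ids with score = highest are appended
theorem pv_loopA_noexc (my : List (List String)) :
    ∀ (ps : List (Int × List (List String))) (hs : Int) (hp : PySem.Set Int),
    (∀ p ∈ ps, pvSymSim my p.2 ≤ hs) →
    pvLoopA my ps (hs, hp)
      = (hs, ps.foldl (fun s p => if pvSymSim my p.2 = hs then PySem.Set.add s p.1 else s) hp) := by
  intro ps
  induction ps with
  | nil => intro hs hp _; rfl
  | cons q rest ih =>
    intro hs hp h
    have hq := h q (List.mem_cons_self)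
    simp only [pvLoopA, List.foldl_cons]
    by_cases he : pvSymSim my q.2 = hs
    · simp only [he, if_pos]
      exact ih hs _ (fun p hp' => h p (List.mem_cons_of_mem _ hp'))
    · have hlt : ¬ hs < pvSymSim my q.2 := not_lt.mpr hq
      simp only [he, hlt, if_false]
      exact ih hs hp (fun p hp' => h p (List.mem_cons_of_mem _ hp'))

-- A's loop when some score exceeds the accumulator: it returns the max and ALL ids achieving it
theorem pv_loopA_char (my : List (List String)) :
    ∀ (ps : List (Int × List (List String))) (hs : Int) (hp : PySem.Set Int) (M : Int),
    M = ps.foldl (fun a p => max a (pvSymSim my p.2)) hs →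
    (∃ p ∈ ps, hs < pvSymSim my p.2) →
    pvLoopA my ps (hs, hp)
      = (M, PySem.Set.ofList ((ps.filter (fun p => pvSymSim my p.2 == M)).map Prod.fst)) := by
  intro ps
  induction ps with
  | nil => intro hs hp M _ hex; exact absurd hex (by simp)
  | cons q rest ih =>
    intro hs hp M hM hex
    simp only [List.foldl_cons] at hM
    simp only [pvLoopA, List.filter_cons]
    by_cases he : pvSymSim my q.2 = hs
    · -- equal branch: the exceeding element is in rest
      obtain ⟨p', hp', hlt'⟩ := hex
      rcases List.mem_cons.mp hp' with rfl | hp'rest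
      · exact absurd hlt' (by omega)
      have hex' : ∃ p ∈ rest, hs < pvSymSim my p.2 := ⟨p', hp'rest, hlt'⟩
      have hM' : M = rest.foldl (fun a p => max a (pvSymSim my p.2)) hs := by
        rw [hM, he, max_self]
      -- hs < M, so q (score hs) is not kept by the filter
      have hMbig : hs < M := by
        have h2 := (PySem.List.le_foldl_max_int rest (fun p => pvSymSim my p.2) hs).2 p' hp'rest
        rw [hM']; omega
      have hqf : (hs == M) = false := by simp; omega
      simp only [he, hqf, if_true, Bool.false_eq_true, if_false]
      exact ih hs _ M hM' hex'
    · by_cases hlt : hs < pvSymSim my q.2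
      · simp only [he, hlt, if_pos]
        have hmax : max hs (pvSymSim my q.2) = pvSymSim my q.2 := max_eq_right (le_of_lt hlt)
        rw [hmax] at hM
        by_cases hex2 : ∃ p ∈ rest, pvSymSim my q.2 < pvSymSim my p.2
        · -- a later element exceeds q's score: q is not maximal
          have hMbig : pvSymSim my q.2 < M := by
            obtain ⟨p', hp', h'⟩ := hex2
            have h2 := (PySem.List.le_foldl_max_int rest (fun p => pvSymSim my p.2) (pvSymSim my q.2)).2 p' hp'
            rw [hM]; omega
          have hqf : (pvSymSim my q.2 == M) = false := by simp; omega
          simp only [hqf, Bool.false_eq_true, if_false]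
          exact ih (pvSymSim my q.2) _ M hM hex2
        · -- q's score is the max
          push_neg at hex2
          have hMeq : M = pvSymSim my q.2 := by
            rw [hM]; exact pv_foldl_max_stay _ rest _ hex2
          have hqf : (pvSymSim my q.2 == M) = true := by simp [hMeq]
          have hall : ∀ p ∈ rest, pvSymSim my p.2 ≤ pvSymSim my q.2 :=
            fun p hp' => hex2 p hp'
          subst hMeq
          simp only [hqf, if_pos, List.map_cons]
          rw [pv_loopA_noexc my rest (pvSymSim my q.2) _ hall,
              pv_foldl_if_filter my (pvSymSim my q.2) rest _]
          refine Prod.ext rfl ?_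
          simp [PySem.Set.ofList_eq_foldl, PySem.Set.empty]
      · -- strictly smaller branch: state unchanged
        have hmax : max hs (pvSymSim my q.2) = hs := max_eq_left (not_lt.mp hlt)
        rw [hmax] at hM
        obtain ⟨p', hp', hlt'⟩ := hex
        rcases List.mem_cons.mp hp' with rfl | hp'rest
        · exact absurd hlt' hlt
        have hex' : ∃ p ∈ rest, hs < pvSymSim my p.2 := ⟨p', hp'rest, hlt'⟩
        have hMbig : hs < M := by
          have h2 := (PySem.List.le_foldl_max_int rest (fun p => pvSymSim my p.2) hs).2 p' hp'rest
          rw [hM]; omega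
        have hqf : (pvSymSim my q.2 == M) = false := by simp; omega
        simp only [he, hlt, if_false, hqf, Bool.false_eq_true]
        exact ih hs hp M hM hex'

-- unified: from the empty set, A's loop returns the running max M and exactly the ids achieving M
theorem pv_loopA_main (my : List (List String)) (ps : List (Int × List (List String))) (s0 : Int) :
    pvLoopA my ps (s0, PySem.Set.empty)
      = (ps.foldl (fun a p => max a (pvSymSim my p.2)) s0,
         PySem.Set.ofList ((ps.filter (fun p => pvSymSim my p.2 ==
            ps.foldl (fun a p => max a (pvSymSim my p.2)) s0)).map Prod.fst)) := by
  by_cases hex : ∃ p ∈ ps, s0 < pvSymSim my p.2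
  · exact pv_loopA_char my ps s0 PySem.Set.empty _ rfl hex
  · push_neg at hex
    have hM : ps.foldl (fun a p => max a (pvSymSim my p.2)) s0 = s0 :=
      pv_foldl_max_stay _ ps s0 hex
    rw [hM, pv_loopA_noexc my ps s0 PySem.Set.empty hex, pv_foldl_if_filter my s0 ps _]
    refine Prod.ext rfl ?_
    simp [PySem.Set.ofList_eq_foldl, PySem.Set.empty]

-- ===== VERDICT (by name: the statement is the Claim_ definition above) =====
theorem similarity_to_patients_spec : Claim_equal_similarity_to_patients := by
  intro my all _ _
  unfold Spec_similarity_to_patients similarity_to_patients similarity_to_patients_alt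
  simp only [PySem.List.max?_id_cons, List.foldl_map, List.filter_map, List.map_map]
  rw [pv_loopA_main my all (-1000000000)]
  rfl
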